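-- pv_equiv track=rewrite | github.com/rastislavsvoboda/advent-of-code-2020 | aoc_2020_d16.py | get_intersected_results
-- ===== SOURCE A (Python) =====
-- def get_intersected_results(rules, possible_assignments):
--     intersected_results = []
--     for i in range(len(rules)):
--         possibilities = set(rules.keys())
--         for poss in possible_assignments:
--             possibilities = possibilities.intersection(poss[i])
--         intersected_results.append(possibilities)
--     return intersected_results
-- ===== SOURCE B (Python) =====
-- def get_intersected_results(rules, possible_assignments):
--     keys = set(rules)
--     m = len(possible_assignments)
--     counts = [{} for _ in rules]
--     for poss in possible_assignments:
--         for i, c in enumerate(counts):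
--             for k in set(poss[i]):
--                 c[k] = c.get(k, 0) + 1
--     return [{k for k in keys if c.get(k, 0) == m} for c in counts]
-- ===== Notes on version B (the rewrite author's own statement) =====
-- stated objective: alternative
-- what changed: B replaces A's per-index repeated set intersections with a counting scheme: one pass over the assignments increments, per index, a hit-counter dict for each key seen there, and a key is kept at an index iff its count equals the number of assignments.
import Mathlib
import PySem

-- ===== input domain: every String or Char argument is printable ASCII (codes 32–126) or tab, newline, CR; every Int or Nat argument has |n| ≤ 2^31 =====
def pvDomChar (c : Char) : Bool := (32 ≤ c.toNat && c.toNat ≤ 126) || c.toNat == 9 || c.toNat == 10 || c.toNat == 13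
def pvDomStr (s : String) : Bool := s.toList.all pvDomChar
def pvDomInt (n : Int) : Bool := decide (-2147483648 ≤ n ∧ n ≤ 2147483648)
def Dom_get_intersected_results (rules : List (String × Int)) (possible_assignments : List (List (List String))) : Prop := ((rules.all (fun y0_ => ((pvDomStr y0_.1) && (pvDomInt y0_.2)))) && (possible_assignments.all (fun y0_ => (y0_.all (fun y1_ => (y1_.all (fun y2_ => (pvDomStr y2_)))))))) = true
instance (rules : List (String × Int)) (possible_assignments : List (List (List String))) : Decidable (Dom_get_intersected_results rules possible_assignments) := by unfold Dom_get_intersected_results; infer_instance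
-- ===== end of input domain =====

-- B replaces A's repeated set intersections by hit-counting: one pass over assignments bumps a per-index counter dict, and a key survives iff its count equals the number of assignments; alternative decomposition, same cost.
-- ===== PORT A =====
def get_intersected_results (rules : List (String × Int)) (possible_assignments : List (List (List String))) : List (List String) :=
  (PySem.List.pyRange 0 ((PySem.List.dedup (rules.map Prod.fst)).length : Int) 1).foldl
    (fun acc i =>
      acc ++ [possible_assignments.foldl
        (fun poss p => PySem.Set.inter poss (PySem.List.pyGetD p i []))
        (PySem.Set.ofList (PySem.List.dedup (rules.map Prod.fst)))])
    []

-- ===== PORT B =====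
def get_intersected_results_alt (rules : List (String × Int)) (possible_assignments : List (List (List String))) : List (List String) :=
  let keys := PySem.Set.ofList (rules.map Prod.fst)
  let m : Int := possible_assignments.length
  let counts : List (PySem.Dict String Int) :=
    possible_assignments.foldl
      (fun counts poss =>
        (PySem.List.enumerate counts 0).map (fun ic =>
          (PySem.Set.ofList (PySem.List.pyGetD poss ic.1 [])).foldl
            (fun c k => PySem.Dict.modify c k 0 (· + 1)) ic.2))
      (keys.map (fun _ => PySem.Dict.empty))
  counts.map (fun c => PySem.Set.ofList (keys.filter (fun k => PySem.Dict.getD c k 0 == m)))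

-- ===== PRECONDITION & SPEC =====
-- Pre_ excludes exactly the inputs where Python A raises IndexError: some assignment shorter than the number of distinct rule keys.
def Pre_get_intersected_results (rules : List (String × Int)) (possible_assignments : List (List (List String))) : Prop :=
  ∀ p ∈ possible_assignments, (PySem.List.dedup (rules.map Prod.fst)).length ≤ p.length
instance (rules : List (String × Int)) (possible_assignments : List (List (List String))) : Decidable (Pre_get_intersected_results rules possible_assignments) := by unfold Pre_get_intersected_results; infer_instance
def pvWitness_get_intersected_results : (List (String × Int)) × List (List (List String)) :=
  ([("a", 1), ("b", 2)], [[["a", "b"], ["b"]], [["a"], ["b", "a"]]])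

def Spec_get_intersected_results (rules : List (String × Int)) (possible_assignments : List (List (List String))) (out : List (List String)) : Prop := out = get_intersected_results_alt rules possible_assignments
instance (rules : List (String × Int)) (possible_assignments : List (List (List String))) (out : List (List String)) : Decidable (Spec_get_intersected_results rules possible_assignments out) := by unfold Spec_get_intersected_results; infer_instance

-- ===== CLAIM (what is proved, stated in full; the proofs are below) =====
def Claim_equal_get_intersected_results : Prop := ∀ (rules : List (String × Int)) (possible_assignments : List (List (List String))), Dom_get_intersected_results rules possible_assignments → Pre_get_intersected_results rules possible_assignments → Spec_get_intersected_results rules possible_assignments (get_intersected_results rules possible_assignments)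

-- ===== LEMMAS AND PROOFS =====

-- One B-step on a range-indexed map of accumulators acts pointwise at each index.
theorem pv_step_map {α : Type} (step : Int → α → α) (g : Int → α) (n : Nat) :
    (PySem.List.enumerate ((PySem.List.pyRange 0 (n : Int) 1).map g) 0).map
      (fun ic => step ic.1 ic.2)
    = (PySem.List.pyRange 0 (n : Int) 1).map (fun i => step i (g i)) := by
  apply List.ext_getElem
  · simp
  · intro k h1 h2
    simp [PySem.List.getElem_enumerate, PySem.List.getElem_pyRange_one]

-- Invariant of B's outer fold: it keeps each index's accumulated state.
theorem pv_fold_inv {α : Type} (f : List (List String) → Int → α → α)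
    (pas : List (List (List String))) :
    ∀ (n : Nat) (g : Int → α),
    pas.foldl (fun acc poss => (PySem.List.enumerate acc 0).map
        (fun ic => f poss ic.1 ic.2))
      ((PySem.List.pyRange 0 (n : Int) 1).map g)
    = (PySem.List.pyRange 0 (n : Int) 1).map
        (fun i => pas.foldl (fun c p => f p i c) (g i)) := by
  induction pas with
  | nil => intro n g; rfl
  | cons p pas ih =>
    intro n g
    simp only [List.foldl_cons]
    rw [pv_step_map (fun i c => f p i c) g n, ih n (fun i => f p i (g i))]

-- ofList is the identity on a filtered duplicate-free list.
theorem pv_ofList_filter {p : String → Bool} {l : List String} (h : l.Nodup) :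
    PySem.Set.ofList (l.filter p) = l.filter p :=
  PySem.Set.ofList_eq_self_of_nodup _ (h.filter p)

-- A's inner fold of intersections is one filter by "in every assignment's i-th set".
theorem pv_foldl_inter {β : Type} (q : β → String → Bool) (pas : List β) :
    ∀ (S : List String),
    pas.foldl (fun s p => s.filter (fun k => q p k)) S
    = S.filter (fun k => pas.all (fun p => q p k)) := by
  induction pas with
  | nil => intro S; simp
  | cons p pas ih =>
    intro S
    simp only [List.foldl_cons, ih, List.filter_filter, List.all_cons]
    apply List.filter_congr
    intro k _
    simp [Bool.and_comm]

-- B's counter at index i holds, for each key, the number of assignments containing it there.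
theorem pv_getD_counts (pas : List (List (List String))) (i : Int) (k : String) :
    ∀ (d : PySem.Dict String Int),
    (pas.foldl (fun c p => (PySem.Set.ofList (PySem.List.pyGetD p i [])).foldl
        (fun c k => PySem.Dict.modify c k 0 (· + 1)) c) d).getD k 0
    = d.getD k 0 + (pas.countP (fun p => (PySem.List.pyGetD p i []).contains k) : Int) := by
  induction pas with
  | nil => intro d; simp
  | cons p pas ih =>
    intro d
    simp only [List.foldl_cons, ih, PySem.Dict.getD_foldl_modify_add_one, List.countP_cons]
    by_cases h : k ∈ PySem.List.pyGetD p i []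
    · rw [List.count_eq_one_of_mem (PySem.Set.nodup_ofList _) (by simpa [PySem.Set.mem_ofList])]
      simp [h]
      omega
    · rw [List.count_eq_zero_of_not_mem (by simpa [PySem.Set.mem_ofList])]
      simp [h]

-- Per index: "count equals number of assignments" is exactly "in every assignment".
theorem pv_index_eq (pas : List (List (List String))) (keys : List String) (i : Int)
    (hnd : keys.Nodup) :
    pas.foldl (fun s p => PySem.Set.inter s (PySem.List.pyGetD p i [])) keys
    = PySem.Set.ofList (keys.filter (fun k =>
        (pas.foldl (fun c p => (PySem.Set.ofList (PySem.List.pyGetD p i [])).foldl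
            (fun c k => PySem.Dict.modify c k 0 (· + 1)) c) PySem.Dict.empty).getD k 0
          == (pas.length : Int))) := by
  rw [pv_ofList_filter hnd]
  simp only [PySem.Set.inter]
  rw [pv_foldl_inter]
  apply List.filter_congr
  intro k _
  have h0 : (PySem.Dict.empty : PySem.Dict String Int).getD k 0 = 0 := rfl
  rw [pv_getD_counts pas i k PySem.Dict.empty, h0, zero_add]
  rw [Bool.eq_iff_iff]
  simp only [List.all_eq_true, beq_iff_eq, Nat.cast_inj]
  exact List.countP_eq_length.symm

-- ===== VERDICT (by name: the statement is the Claim_ definition above) =====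
theorem get_intersected_results_spec : Claim_equal_get_intersected_results := by
  intro rules pas _ _
  unfold Spec_get_intersected_results get_intersected_results get_intersected_results_alt
  dsimp only
  rw [PySem.List.foldl_append_singleton_eq_map, List.nil_append]
  simp only [PySem.List.dedup_eq_ofList, PySem.Set.ofList_ofList]
  set keys := PySem.Set.ofList (rules.map Prod.fst) with hk
  have h1 : keys.map (fun _ => (PySem.Dict.empty : PySem.Dict String Int))
      = (PySem.List.pyRange 0 (keys.length : Int) 1).map (fun _ => PySem.Dict.empty) := by
    rw [List.map_const', List.map_const', PySem.List.length_pyRange_one]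
    simp
  rw [h1, pv_fold_inv (fun p i c => (PySem.Set.ofList (PySem.List.pyGetD p i [])).foldl
      (fun c k => PySem.Dict.modify c k 0 (· + 1)) c) pas keys.length (fun _ => PySem.Dict.empty)]
  rw [List.map_map]
  apply List.map_congr_left
  intro i _
  simp only [Function.comp_apply]
  exact pv_index_eq pas keys i (by rw [hk]; exact PySem.Set.nodup_ofList _)
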